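-- pv_equiv track=rewrite | github.com/dflr10/Retos-Python-Misi-nTIC-Ciclo1 | laminas.py | puedocambiar
-- ===== SOURCE A (Python) =====
-- def puedocambiar(L_Depto_A, L_Depto_B):
--     counter = 0
--     counter2 = 0
--     for empleado in L_Depto_A:
--         if empleado not in L_Depto_B:
--             counter += 1
--
--     for empleado in L_Depto_B:
--         if empleado not in L_Depto_A:
--             counter2 += 1
--
--     return (counter if counter < counter2 else counter2)
-- ===== SOURCE B (Python) =====
-- def puedocambiar(L_Depto_A, L_Depto_B):
--     a = sorted(L_Depto_A)
--     b = sorted(L_Depto_B)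
--     i, j = 0, 0
--     only_a, only_b = 0, 0
--     while i < len(a) and j < len(b):
--         if a[i] < b[j]:
--             only_a += 1
--             i += 1
--         elif b[j] < a[i]:
--             only_b += 1
--             j += 1
--         else:
--             v = a[i]
--             while i < len(a) and a[i] == v:
--                 i += 1
--             while j < len(b) and b[j] == v:
--                 j += 1
--     only_a += len(a) - i
--     only_b += len(b) - j
--     return only_a if only_a <= only_b else only_b
-- ===== Notes on version B (the rewrite author's own statement) =====
-- stated objective: alternative
-- what changed: B sorts both lists and counts the elements unique to each side in a single two-pointer merge scan that skips equal-value runs on both sides together, instead of A's two per-element scans each doing a linear membership test on the other list.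
import Mathlib
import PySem

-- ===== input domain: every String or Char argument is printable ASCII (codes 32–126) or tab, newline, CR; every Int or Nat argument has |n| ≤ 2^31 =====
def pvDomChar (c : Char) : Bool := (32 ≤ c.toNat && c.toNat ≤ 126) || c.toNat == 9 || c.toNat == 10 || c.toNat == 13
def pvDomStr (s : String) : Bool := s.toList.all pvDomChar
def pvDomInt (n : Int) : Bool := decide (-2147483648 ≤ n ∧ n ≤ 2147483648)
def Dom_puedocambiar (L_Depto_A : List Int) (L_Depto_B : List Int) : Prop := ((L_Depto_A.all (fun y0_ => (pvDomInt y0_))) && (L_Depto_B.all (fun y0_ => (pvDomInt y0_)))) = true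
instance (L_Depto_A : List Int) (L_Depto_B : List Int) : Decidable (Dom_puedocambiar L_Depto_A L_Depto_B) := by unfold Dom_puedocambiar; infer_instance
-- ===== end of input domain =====

-- B sorts both lists and counts the elements unique to each side in one two-pointer
-- merge scan (skipping equal-value runs on both sides together), instead of A's
-- per-element scan with a linear membership test on the other list (objective: alternative).

-- ===== PORT A =====
def puedocambiar (L_Depto_A : List Int) (L_Depto_B : List Int) : Int :=
  let counter := L_Depto_A.foldl (fun c empleado => if !(L_Depto_B.contains empleado) then c + 1 else c) 0
  let counter2 := L_Depto_B.foldl (fun c empleado => if !(L_Depto_A.contains empleado) then c + 1 else c) 0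
  if counter < counter2 then counter else counter2

-- ===== PORT B =====
-- the while loop of Source B: the two index pointers become the two remaining suffixes;
-- the inner run-skipping while loops become dropWhile; when one suffix is exhausted
-- the loop ends and the remainder's length is added (the base cases)
def pvScan : List Int → List Int → Int × Int
  | [], b => (0, (b.length : Int))
  | x :: a', [] => (((x :: a').length : Int), 0)
  | x :: a', y :: b' =>
    if x < y then
      let p := pvScan a' (y :: b'); (p.1 + 1, p.2)
    else if y < x then
      let p := pvScan (x :: a') b'; (p.1, p.2 + 1)
    else
      pvScan ((x :: a').dropWhile (fun t => t == x)) ((y :: b').dropWhile (fun t => t == x))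
  termination_by a b => a.length + b.length
  decreasing_by
  · simp
  · simp
  · have h1 : ((x :: a').dropWhile (fun t => t == x)).length ≤ a'.length := by
      simp
      exact List.length_dropWhile_le _ _
    have h2 : ((y :: b').dropWhile (fun t => t == x)).length ≤ b'.length + 1 :=
      List.length_dropWhile_le _ _
    simp only [List.length_cons]
    omega

def puedocambiar_alt (L_Depto_A : List Int) (L_Depto_B : List Int) : Int :=
  let a := PySem.List.sorted L_Depto_A (fun x => x) false
  let b := PySem.List.sorted L_Depto_B (fun x => x) false
  let p := pvScan a b
  let only_a := p.1
  let only_b := p.2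
  if only_a ≤ only_b then only_a else only_b

-- ===== PRECONDITION & SPEC =====
def Spec_puedocambiar (L_Depto_A : List Int) (L_Depto_B : List Int) (out : Int) : Prop := out = puedocambiar_alt L_Depto_A L_Depto_B
instance (L_Depto_A : List Int) (L_Depto_B : List Int) (out : Int) : Decidable (Spec_puedocambiar L_Depto_A L_Depto_B out) := by unfold Spec_puedocambiar; infer_instance

-- ===== CLAIM (what is proved, stated in full; the proofs are below) =====
def Claim_equal_puedocambiar : Prop := ∀ (L_Depto_A : List Int) (L_Depto_B : List Int), Dom_puedocambiar L_Depto_A L_Depto_B → Spec_puedocambiar L_Depto_A L_Depto_B (puedocambiar L_Depto_A L_Depto_B)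

-- ===== LEMMAS AND PROOFS =====

-- A's counting loop is countP
lemma pv_foldl_count (p : Int → Bool) (l : List Int) (c : Int) :
    l.foldl (fun c e => if p e then c + 1 else c) c = c + (l.countP p : Int) := by
  induction l generalizing c with
  | nil => simp
  | cons x xs ih =>
    by_cases h : p x <;> simp [h, ih] <;> push_cast <;> ring

-- after dropping the leading run of x from a sorted list bounded below by x, everything is > x
lemma pv_dropWhile_run_gt (x : Int) (l : List Int) (h : l.Pairwise (· ≤ ·))
    (hx : ∀ t ∈ l, x ≤ t) : ∀ t ∈ l.dropWhile (fun t => t == x), x < t := by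
  induction l with
  | nil => simp
  | cons a l ih =>
    intro t ht
    by_cases hax : (a == x) = true
    · rw [List.dropWhile_cons, if_pos hax] at ht
      exact ih h.of_cons (fun u hu => hx u (List.mem_cons_of_mem _ hu)) t ht
    · rw [List.dropWhile_cons, if_neg hax] at ht
      simp only [beq_iff_eq] at hax
      rcases List.mem_cons.1 ht with rfl | ht'
      · have := hx t (List.mem_cons_self ..); omega
      · have h1 := (List.pairwise_cons.1 h).1 t ht'
        have := hx a (List.mem_cons_self ..); omega

lemma pvScan_eq (a b : List Int) (ha : a.Pairwise (· ≤ ·)) (hb : b.Pairwise (· ≤ ·)) :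
    pvScan a b = ((a.countP (fun t => !(b.contains t)) : Int),
                  (b.countP (fun t => !(a.contains t)) : Int)) := by
  induction a, b using pvScan.induct with
  | case1 b => simp [pvScan]
  | case2 x a' => simp [pvScan]
  | case3 x a2 y b2 hlt ih =>
    have hyb : ∀ t ∈ b2, y ≤ t := (List.pairwise_cons.1 hb).1
    have hxnb : x ∉ y :: b2 := by
      intro h
      rcases List.mem_cons.1 h with h | h
      · omega
      · have := hyb _ h; omega
    rw [pvScan, if_pos hlt, ih ha.of_cons hb]
    have h1 : List.countP (fun t => !(y :: b2).contains t) (x :: a2)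
        = List.countP (fun t => !(y :: b2).contains t) a2 + 1 := by
      rw [List.countP_cons]
      simp [List.contains_iff_mem, hxnb]
    have h2 : List.countP (fun t => !(x :: a2).contains t) (y :: b2)
        = List.countP (fun t => !a2.contains t) (y :: b2) := by
      apply List.countP_congr
      intro t ht
      have htx : t ≠ x := by
        rcases List.mem_cons.1 ht with rfl | ht'
        · omega
        · have := hyb _ ht'; omega
      simp [List.contains_iff_mem, List.mem_cons, htx]
    rw [h1, h2]
    push_cast
    ring_nf
  | case4 x a2 y b2 hnlt hlt ih =>
    have hxa : ∀ t ∈ a2, x ≤ t := (List.pairwise_cons.1 ha).1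
    have hyna : y ∉ x :: a2 := by
      intro h
      rcases List.mem_cons.1 h with h | h
      · omega
      · have := hxa _ h; omega
    rw [pvScan, if_neg hnlt, if_pos hlt, ih ha hb.of_cons]
    have h1 : List.countP (fun t => !(x :: a2).contains t) (y :: b2)
        = List.countP (fun t => !(x :: a2).contains t) b2 + 1 := by
      rw [List.countP_cons]
      simp [List.contains_iff_mem, hyna]
    have h2 : List.countP (fun t => !(y :: b2).contains t) (x :: a2)
        = List.countP (fun t => !b2.contains t) (x :: a2) := by
      apply List.countP_congr
      intro t ht
      have hty : t ≠ y := by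
        rcases List.mem_cons.1 ht with rfl | ht'
        · omega
        · have := hxa _ ht'; omega
      simp [List.contains_iff_mem, List.mem_cons, hty]
    rw [h1, h2]
    push_cast
    ring_nf
  | case5 x a2 y b2 hnlt hnlt2 ih =>
    have hxy : x = y := by omega
    subst hxy
    have hxa : ∀ t ∈ x :: a2, x ≤ t := by
      intro t ht
      rcases List.mem_cons.1 ht with rfl | ht'
      · omega
      · exact (List.pairwise_cons.1 ha).1 t ht'
    have hxb : ∀ t ∈ x :: b2, x ≤ t := by
      intro t ht
      rcases List.mem_cons.1 ht with rfl | ht'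
      · omega
      · exact (List.pairwise_cons.1 hb).1 t ht'
    have hda := pv_dropWhile_run_gt x (x :: a2) ha hxa
    have hdb := pv_dropWhile_run_gt x (x :: b2) hb hxb
    have hsa : ((x :: a2).dropWhile (fun t => t == x)).Pairwise (· ≤ ·) :=
      ha.sublist (List.dropWhile_sublist _)
    have hsb : ((x :: b2).dropWhile (fun t => t == x)).Pairwise (· ≤ ·) :=
      hb.sublist (List.dropWhile_sublist _)
    rw [pvScan, if_neg hnlt, if_neg hnlt2, ih hsa hsb]
    -- abbreviations
    set da := (x :: a2).dropWhile (fun t => t == x) with hdaeq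
    set db := (x :: b2).dropWhile (fun t => t == x) with hdbeq
    have hsplita : (x :: a2).takeWhile (fun t => t == x) ++ da = x :: a2 :=
      List.takeWhile_append_dropWhile
    have hsplitb : (x :: b2).takeWhile (fun t => t == x) ++ db = x :: b2 :=
      List.takeWhile_append_dropWhile
    have hmema : ∀ t, t ∈ x :: a2 ↔ (t = x ∨ t ∈ da) := by
      intro t
      constructor
      · intro h
        rw [← hsplita] at h
        rcases List.mem_append.1 h with h | h
        · left; have := List.mem_takeWhile_imp h; simpa using this
        · right; exact h
      · intro h
        rcases h with rfl | h
        · exact List.mem_cons_self ..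
        · rw [← hsplita]; exact List.mem_append.2 (Or.inr h)
    have hmemb : ∀ t, t ∈ x :: b2 ↔ (t = x ∨ t ∈ db) := by
      intro t
      constructor
      · intro h
        rw [← hsplitb] at h
        rcases List.mem_append.1 h with h | h
        · left; have := List.mem_takeWhile_imp h; simpa using this
        · right; exact h
      · intro h
        rcases h with rfl | h
        · exact List.mem_cons_self ..
        · rw [← hsplitb]; exact List.mem_append.2 (Or.inr h)
    have h1 : List.countP (fun t => !(x :: b2).contains t) (x :: a2)
        = List.countP (fun t => !db.contains t) da := by
      rw [← hsplita, List.countP_append]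
      have hz : List.countP (fun t => !(x :: b2).contains t) ((x :: a2).takeWhile (fun t => t == x)) = 0 := by
        apply List.countP_eq_zero.2
        intro t ht
        have : t = x := by simpa using List.mem_takeWhile_imp ht
        subst this
        simp [List.contains_iff_mem]
      rw [hz]
      simp only [Nat.zero_add]
      apply List.countP_congr
      intro t ht
      have htx : x < t := hda t ht
      have : (x :: b2).contains t = db.contains t := by
        by_cases h : t ∈ db
        · simp [List.contains_iff_mem, h, (hmemb t).2 (Or.inr h)]
        · have : t ∉ x :: b2 := by
            intro hmem
            rcases (hmemb t).1 hmem with rfl | hdd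
            · omega
            · exact h hdd
          simp [List.contains_iff_mem, h, this]
      rw [this]
    have h2 : List.countP (fun t => !(x :: a2).contains t) (x :: b2)
        = List.countP (fun t => !da.contains t) db := by
      rw [← hsplitb, List.countP_append]
      have hz : List.countP (fun t => !(x :: a2).contains t) ((x :: b2).takeWhile (fun t => t == x)) = 0 := by
        apply List.countP_eq_zero.2
        intro t ht
        have : t = x := by simpa using List.mem_takeWhile_imp ht
        subst this
        simp [List.contains_iff_mem]
      rw [hz]
      simp only [Nat.zero_add]
      apply List.countP_congr
      intro t ht
      have htx : x < t := hdb t ht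
      have : (x :: a2).contains t = da.contains t := by
        by_cases h : t ∈ da
        · simp [List.contains_iff_mem, h, (hmema t).2 (Or.inr h)]
        · have : t ∉ x :: a2 := by
            intro hmem
            rcases (hmema t).1 hmem with rfl | hdd
            · omega
            · exact h hdd
          simp [List.contains_iff_mem, h, this]
      rw [this]
    rw [h1, h2]

-- sorting changes neither countP of a membership predicate nor membership itself
lemma pv_sorted_countP (A B : List Int) :
    ((PySem.List.sorted A (fun x => x) false).countP
        (fun t => !(PySem.List.sorted B (fun x => x) false).contains t))
      = A.countP (fun t => !(B.contains t)) := by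
  have hp : (fun t : Int => !(PySem.List.sorted B (fun x => x) false).contains t)
      = (fun t => !(B.contains t)) := by
    funext t
    by_cases h : t ∈ B
    · simp [List.contains_iff_mem, h, (PySem.List.mem_sorted ..).2 h]
    · have h2 : t ∉ PySem.List.sorted B (fun x => x) false := fun hc => h ((PySem.List.mem_sorted ..).1 hc)
      simp [List.contains_iff_mem, h, h2]
  rw [hp]
  exact (PySem.List.sorted_perm A (fun x => x) false).countP_eq _

-- ===== VERDICT (by name: the statement is the Claim_ definition above) =====
theorem puedocambiar_spec : Claim_equal_puedocambiar := by
  intro A B _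
  unfold Spec_puedocambiar puedocambiar puedocambiar_alt
  dsimp only
  rw [pvScan_eq _ _ (PySem.List.sorted_pairwise A (fun x => x))
        (PySem.List.sorted_pairwise B (fun x => x)),
      pv_sorted_countP A B, pv_sorted_countP B A,
      pv_foldl_count, pv_foldl_count]
  simp only [Int.zero_add, zero_add]
  split_ifs <;> omega
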